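-- pv_equiv track=rewrite | github.com/X1aoR0/RLFuzz_peach | ZZRFuzz/ZZRFuzz_crackseed.py | crack_seed
-- ===== SOURCE A (Python) =====
-- def crack_seed(cov_per_byte):
--     seed_block = []
--     cur_start = 0
--     cur_cov = cov_per_byte[0]
--     for i in range(len(cov_per_byte)):
--         if cov_per_byte[i] != cur_cov:
--             seed_block.append([cur_start,i])
--             cur_start = i
--             cur_cov = cov_per_byte[i]
--
--     seed_block.append([cur_start,len(cov_per_byte)])
--
--     mutate_block_index = []
--     for i in range(len(seed_block)):
--         mutate_block_index.append(i)
--     return seed_block,mutate_block_index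
-- ===== SOURCE B (Python) =====
-- def crack_seed(cov_per_byte):
--     def go(lo, hi):
--         # blocks of the segment [lo, hi), hi > lo, by divide and conquer:
--         # split in half, solve both halves, merge the two block lists
--         # (fusing the boundary blocks when the coverage value is the same
--         # on both sides of the split point).
--         if hi - lo == 1:
--             return [[lo, hi]]
--         mid = (lo + hi) // 2
--         L = go(lo, mid)
--         R = go(mid, hi)
--         if cov_per_byte[mid - 1] == cov_per_byte[mid]:
--             return L[:-1] + [[L[-1][0], R[0][1]]] + R[1:]
--         return L + R
--     n = len(cov_per_byte)
--     seed_block = go(0, n) if n > 0 else []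
--     return seed_block, list(range(len(seed_block)))
-- ===== Notes on version B (the rewrite author's own statement) =====
-- stated objective: alternative
-- what changed: B computes the blocks by divide and conquer: it recursively splits the index range in half, builds the block lists of the two halves, and merges them (fusing the two boundary blocks when the coverage value is equal across the split), instead of A's single stateful left-to-right scan carrying cur_start/cur_cov; the index list is built with range instead of an append loop.
-- outside the precondition, e.g. on crack_seed([]): A raises IndexError, B returns ([], [])
-- crash fix: On the empty list A raises IndexError (it reads cov_per_byte[0]); B returns ([], []). — e.g. on crack_seed([]): A raises IndexError, B returns ([], [])
import Mathlib
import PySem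

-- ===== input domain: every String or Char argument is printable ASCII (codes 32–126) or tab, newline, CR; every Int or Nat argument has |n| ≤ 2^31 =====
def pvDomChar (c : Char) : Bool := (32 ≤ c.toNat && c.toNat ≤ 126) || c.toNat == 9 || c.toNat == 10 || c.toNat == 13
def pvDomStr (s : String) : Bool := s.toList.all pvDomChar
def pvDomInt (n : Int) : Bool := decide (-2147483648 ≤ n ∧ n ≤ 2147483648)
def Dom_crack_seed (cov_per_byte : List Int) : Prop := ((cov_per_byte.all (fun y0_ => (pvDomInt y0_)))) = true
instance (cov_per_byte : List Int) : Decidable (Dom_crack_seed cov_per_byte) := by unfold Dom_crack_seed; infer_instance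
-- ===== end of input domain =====

-- B builds the block list by divide and conquer (split the index range in half, recurse, merge the
-- two block lists, fusing the boundary blocks when the coverage value is equal across the split)
-- instead of A's single stateful left-to-right scan (objective: alternative).

-- ===== PORT A =====
def crack_seed (cov_per_byte : List Int) : List (List Int) × List Int :=
  match PySem.List.pyGet? cov_per_byte 0 with
  | none => ([], [])   -- Python raises IndexError here; excluded by Pre_crack_seed
  | some c0 =>
    let st :=
      (PySem.List.pyRange 0 (cov_per_byte.length : Int) 1).foldl
        (fun (st : List (List Int) × Int × Int) i =>
          if PySem.List.pyGetD cov_per_byte i 0 ≠ st.2.2 then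
            (st.1 ++ [[st.2.1, i]], i, PySem.List.pyGetD cov_per_byte i 0)
          else st)
        ([], 0, c0)
    let seed_block := st.1 ++ [[st.2.1, (cov_per_byte.length : Int)]]
    let mutate_block_index :=
      (PySem.List.pyRange 0 (seed_block.length : Int) 1).foldl
        (fun (acc : List Int) i => acc ++ [i]) []
    (seed_block, mutate_block_index)

-- ===== PORT B =====
-- B's inner recursive helper `go(lo, hi)`: divide and conquer on the index range.
-- The Nat fuel only bounds the recursion depth (structural totality guard); B calls it with
-- fuel (hi - lo).toNat, which always suffices since each half is strictly shorter.
def pvGo (cov : List Int) : Nat -> Int -> Int -> List (List Int)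
  | 0, _, _ => []
  | fuel + 1, lo, hi =>
    if hi - lo = 1 then [[lo, hi]]
    else
      let mid := PySem.Int.floordiv (lo + hi) 2
      let L := pvGo cov fuel lo mid
      let R := pvGo cov fuel mid hi
      if PySem.List.pyGetD cov (mid - 1) 0 = PySem.List.pyGetD cov mid 0 then
        PySem.List.slice L none (some (-1))
          ++ [[PySem.List.pyGetD (PySem.List.pyGetD L (-1) []) 0 0,
               PySem.List.pyGetD (PySem.List.pyGetD R 0 []) 1 0]]
          ++ PySem.List.slice R (some 1) none
      else L ++ R

def crack_seed_alt (cov_per_byte : List Int) : List (List Int) × List Int :=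
  let n : Int := cov_per_byte.length
  let seed_block := if 0 < n then pvGo cov_per_byte n.toNat 0 n else []
  (seed_block, PySem.List.pyRange 0 (seed_block.length : Int) 1)

-- ===== PRECONDITION & SPEC =====
-- Pre_ excludes only the empty list, on which A raises IndexError (cov_per_byte[0]).
def Pre_crack_seed (cov_per_byte : List Int) : Prop := cov_per_byte ≠ []
instance (cov_per_byte : List Int) : Decidable (Pre_crack_seed cov_per_byte) := by
  unfold Pre_crack_seed; infer_instance
def pvWitness_crack_seed : List Int := [7, 7, 2]

-- On the empty list A raises IndexError (it reads cov_per_byte[0]); B returns ([], []).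
def Raises_crack_seed (cov_per_byte : List Int) : Prop := cov_per_byte = []
instance (cov_per_byte : List Int) : Decidable (Raises_crack_seed cov_per_byte) := by
  unfold Raises_crack_seed; infer_instance
def pvRaiseWitness_crack_seed : List Int := []
def pvRaiseWitnessOut_crack_seed : List (List Int) × List Int := ([], [])

def Spec_crack_seed (cov_per_byte : List Int) (out : List (List Int) × List Int) : Prop :=
  out = crack_seed_alt cov_per_byte
instance (cov_per_byte : List Int) (out : List (List Int) × List Int) :
    Decidable (Spec_crack_seed cov_per_byte out) := by unfold Spec_crack_seed; infer_instance

-- ===== CLAIM (what is proved, stated in full; the proofs are below) =====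
def Claim_equal_crack_seed : Prop := ∀ (cov_per_byte : List Int), Dom_crack_seed cov_per_byte →
  Pre_crack_seed cov_per_byte → Spec_crack_seed cov_per_byte (crack_seed cov_per_byte)
def Claim_raises_crack_seed : Prop :=
  (∀ (cov_per_byte : List Int), Dom_crack_seed cov_per_byte → Raises_crack_seed cov_per_byte →
    ¬ Pre_crack_seed cov_per_byte) ∧
  (Dom_crack_seed (pvRaiseWitness_crack_seed) ∧ Raises_crack_seed (pvRaiseWitness_crack_seed) ∧
    crack_seed_alt (pvRaiseWitness_crack_seed) = pvRaiseWitnessOut_crack_seed)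

-- ===== LEMMAS AND PROOFS =====

-- block boundary indices of `suf`, first index i, previous coverage value cc
def pvBnds (i cc : Int) : List Int → List Int
  | [] => []
  | v :: rest => if v ≠ cc then i :: pvBnds (i + 1) v rest else pvBnds (i + 1) cc rest

-- pairs of adjacent elements
def pvAdj : List Int → List (List Int)
  | x :: y :: rest => [x, y] :: pvAdj (y :: rest)
  | _ => []

-- A's loop body over a fixed coverage list
def pvBody (cov : List Int) (st : List (List Int) × Int × Int) (i : Int) :
    List (List Int) × Int × Int :=
  if PySem.List.pyGetD cov i 0 ≠ st.2.2 then
    (st.1 ++ [[st.2.1, i]], i, PySem.List.pyGetD cov i 0)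
  else st

theorem pvGetD_append_length (pre rest : List Int) (v d : Int) :
    PySem.List.pyGetD (pre ++ v :: rest) (pre.length : Int) d = v := by
  simp [PySem.List.pyGetD_natCast, List.getD]

-- A's loop over the tail `suf` of cov, then closed with the final append,
-- equals the adjacent pairs of (cs :: boundaries of suf ++ [len cov]).
theorem pvA_loop (suf : List Int) : ∀ (pre cov : List Int) (acc : List (List Int)) (cs cc : Int),
    cov = pre ++ suf →
    (let st := (PySem.List.pyRange (pre.length : Int) (cov.length : Int) 1).foldl
        (pvBody cov) (acc, cs, cc)
     st.1 ++ [[st.2.1, (cov.length : Int)]])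
    = acc ++ pvAdj (cs :: pvBnds (pre.length : Int) cc suf ++ [(cov.length : Int)]) := by
  induction suf with
  | nil =>
    intro pre cov acc cs cc hcov
    subst hcov
    simp [PySem.List.pyRange_one_eq_nil, pvBnds, pvAdj]
  | cons v rest ih =>
    intro pre cov acc cs cc hcov
    have hlen : (cov.length : Int) = (pre.length : Int) + 1 + rest.length := by
      subst hcov; simp; omega
    have hlt : (pre.length : Int) < (cov.length : Int) := by omega
    rw [PySem.List.pyRange_one_cons hlt, List.foldl_cons]
    have hget : PySem.List.pyGetD cov (pre.length : Int) 0 = v := by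
      subst hcov; exact pvGetD_append_length pre rest v 0
    have hcov' : cov = (pre ++ [v]) ++ rest := by subst hcov; simp
    have hlen' : ((pre ++ [v]).length : Int) = (pre.length : Int) + 1 := by simp
    by_cases hvc : v = cc
    · have hb : pvBody cov (acc, cs, cc) (pre.length : Int) = (acc, cs, cc) := by
        simp [pvBody, hget, hvc]
      rw [hb]
      have := ih (pre ++ [v]) cov acc cs cc hcov'
      rw [hlen'] at this
      simp only at this ⊢
      rw [this]
      simp [pvBnds, hvc]
    · have hb : pvBody cov (acc, cs, cc) (pre.length : Int)
          = (acc ++ [[cs, (pre.length : Int)]], (pre.length : Int), v) := by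
        simp [pvBody, hget, hvc]
      rw [hb]
      have := ih (pre ++ [v]) cov (acc ++ [[cs, (pre.length : Int)]]) (pre.length : Int) v hcov'
      rw [hlen'] at this
      simp only at this ⊢
      rw [this]
      simp [pvBnds, hvc, pvAdj]

-- the neighbour-comparison filter over an index range equals the boundary list
theorem pvB_filter (suf : List Int) : ∀ (pre cov : List Int) (c : Int),
    cov = pre ++ c :: suf →
    (PySem.List.pyRange ((pre.length : Int) + 1) (cov.length : Int) 1).filter
      (fun i => PySem.List.pyGetD cov i 0 ≠ PySem.List.pyGetD cov (i - 1) 0)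
    = pvBnds ((pre.length : Int) + 1) c suf := by
  induction suf with
  | nil =>
    intro pre cov c hcov
    subst hcov
    simp [PySem.List.pyRange_one_eq_nil, pvBnds]
  | cons v rest ih =>
    intro pre cov c hcov
    have hlen : (cov.length : Int) = (pre.length : Int) + 2 + rest.length := by
      subst hcov; simp; omega
    have hlt : (pre.length : Int) + 1 < (cov.length : Int) := by omega
    rw [PySem.List.pyRange_one_cons hlt, List.filter_cons]
    have hgetv : PySem.List.pyGetD cov ((pre.length : Int) + 1) 0 = v := by
      have h1 : cov = (pre ++ [c]) ++ v :: rest := by subst hcov; simp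
      have h2 : ((pre ++ [c]).length : Int) = (pre.length : Int) + 1 := by simp
      rw [h1, ← h2, pvGetD_append_length]
    have hgetc : PySem.List.pyGetD cov ((pre.length : Int) + 1 - 1) 0 = c := by
      have : (pre.length : Int) + 1 - 1 = (pre.length : Int) := by omega
      rw [this, hcov, pvGetD_append_length]
    have hrec := ih (pre ++ [c]) cov v (by subst hcov; simp)
    have h2 : ((pre ++ [c]).length : Int) = (pre.length : Int) + 1 := by simp
    rw [h2] at hrec
    by_cases hvc : v = c
    · simp only [hgetv, hgetc, hvc, ne_eq, not_true_eq_false, decide_false]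
      rw [hrec]
      simp [pvBnds, hvc]
    · simp only [hgetv, hgetc, ne_eq, hvc, not_false_eq_true, decide_true]
      rw [hrec]
      simp [pvBnds, hvc]

-- splitting the adjacent-pairs list at an interior point
theorem pvAdj_append (u : List Int) (hu : u ≠ []) (h : Int) (t : List Int) :
    pvAdj (u ++ h :: t) = pvAdj u ++ [u.getLast hu, h] :: pvAdj (h :: t) := by
  induction u with
  | nil => exact absurd rfl hu
  | cons x u' ih =>
    cases u' with
    | nil => simp [pvAdj]
    | cons y u'' =>
      have := ih (by simp)
      simp only [List.cons_append, pvAdj] at this ⊢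
      rw [this]
      simp [List.getLast]

theorem pvAdj_singleton (x : Int) : pvAdj [x] = [] := rfl

-- B's divide and conquer equals the adjacent pairs of the boundary list of the segment
theorem pvGo_eq (cov : List Int) : ∀ (k : ℕ) (lo hi : Int), (hi - lo).toNat ≤ k → lo < hi →
    pvGo cov k lo hi = pvAdj (lo :: (PySem.List.pyRange (lo + 1) hi 1).filter
      (fun j => PySem.List.pyGetD cov j 0 ≠ PySem.List.pyGetD cov (j - 1) 0) ++ [hi]) := by
  intro k
  induction k with
  | zero => intro lo hi hk hlt; omega
  | succ m ih =>
    intro lo hi hk hlt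
    by_cases h1 : hi - lo = 1
    · have : hi = lo + 1 := by omega
      subst this
      simp [pvGo, PySem.List.pyRange_one_eq_nil, pvAdj]
    · have h2 : 2 ≤ hi - lo := by omega
      rw [pvGo]
      simp only [h1, if_false]
      have hmid : PySem.Int.floordiv (lo + hi) 2 = (lo + hi) / 2 :=
        PySem.Int.floordiv_eq_ediv_of_pos (by omega)
      set mid := PySem.Int.floordiv (lo + hi) 2 with hmiddef
      have hlo : lo < mid := by omega
      have hhi : mid < hi := by omega
      have hL := ih lo mid (by omega) hlo
      have hR := ih mid hi (by omega) hhi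
      simp only [hL, hR]
      -- split the filtered range at mid
      have hsplit : PySem.List.pyRange (lo + 1) hi 1
          = PySem.List.pyRange (lo + 1) mid 1 ++ PySem.List.pyRange mid hi 1 :=
        PySem.List.pyRange_one_append _ _ _ (by omega) (by omega)
      have hconsm : PySem.List.pyRange mid hi 1 = mid :: PySem.List.pyRange (mid + 1) hi 1 :=
        PySem.List.pyRange_one_cons hhi
      set F1 := (PySem.List.pyRange (lo + 1) mid 1).filter
        (fun j => PySem.List.pyGetD cov j 0 ≠ PySem.List.pyGetD cov (j - 1) 0) with hF1
      set F2 := (PySem.List.pyRange (mid + 1) hi 1).filter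
        (fun j => PySem.List.pyGetD cov j 0 ≠ PySem.List.pyGetD cov (j - 1) 0) with hF2
      set u : List Int := lo :: F1 with hu
      have hu0 : u ≠ [] := by simp [hu]
      by_cases heq : PySem.List.pyGetD cov (mid - 1) 0 = PySem.List.pyGetD cov mid 0
      · rw [if_pos heq]
        have hfull : (PySem.List.pyRange (lo + 1) hi 1).filter
            (fun j => PySem.List.pyGetD cov j 0 ≠ PySem.List.pyGetD cov (j - 1) 0)
            = F1 ++ F2 := by
          rw [hF1, hF2, hsplit, List.filter_append, hconsm, List.filter_cons]
          simp [heq.symm]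
        rw [hfull]
        have hLform : pvAdj (lo :: F1 ++ [mid]) = pvAdj u ++ [[u.getLast hu0, mid]] := by
          have := pvAdj_append u hu0 mid []
          simpa [hu, pvAdj_singleton] using this
        obtain ⟨h0, t0, hw⟩ : ∃ h0 t0, F2 ++ [hi] = h0 :: t0 := by
          cases hF : F2 ++ [hi] with
          | nil => exact absurd hF (by simp)
          | cons a b => exact ⟨a, b, rfl⟩
        have hRform : pvAdj (mid :: F2 ++ [hi]) = [mid, h0] :: pvAdj (h0 :: t0) := by
          have : mid :: F2 ++ [hi] = mid :: (h0 :: t0) := by rw [List.cons_append, hw]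
          rw [this]; rfl
        rw [hLform, hRform]
        rw [PySem.List.slice_to_neg_one, PySem.List.slice_from_one]
        rw [PySem.List.pyGetD_neg_one_append_singleton]
        simp only [List.dropLast_concat, List.tail_cons]
        have hget0 : PySem.List.pyGetD ([u.getLast hu0, mid]) 0 0 = u.getLast hu0 := by
          simp [PySem.List.pyGetD_zero_cons]
        have hgetR0 : PySem.List.pyGetD ([mid, h0] :: pvAdj (h0 :: t0)) 0 ([] : List Int)
            = [mid, h0] := by simp [PySem.List.pyGetD_zero_cons]
        have hgetR1 : PySem.List.pyGetD ([mid, h0] : List Int) 1 0 = h0 := by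
          have : ((1 : Int)) = ((1 : ℕ) : Int) := by norm_num
          rw [this, PySem.List.pyGetD_natCast]; rfl
        rw [hgetR0, hget0, hgetR1]
        have htarget : lo :: (F1 ++ F2) ++ [hi] = u ++ (h0 :: t0) := by
          rw [hu]; simp [← hw]
        rw [htarget, pvAdj_append u hu0 h0 t0]
        simp
      · rw [if_neg heq]
        have hfull : (PySem.List.pyRange (lo + 1) hi 1).filter
            (fun j => PySem.List.pyGetD cov j 0 ≠ PySem.List.pyGetD cov (j - 1) 0)
            = F1 ++ mid :: F2 := by
          rw [hF1, hF2, hsplit, List.filter_append, hconsm, List.filter_cons]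
          have hne : ¬ PySem.List.pyGetD cov mid 0 = PySem.List.pyGetD cov (mid - 1) 0 :=
            fun h => heq h.symm
          simp [hne]
        rw [hfull]
        have hLform : pvAdj (lo :: F1 ++ [mid]) = pvAdj u ++ [[u.getLast hu0, mid]] := by
          have := pvAdj_append u hu0 mid []
          simpa [hu, pvAdj_singleton] using this
        have htarget : lo :: (F1 ++ mid :: F2) ++ [hi] = u ++ mid :: (F2 ++ [hi]) := by
          rw [hu]; simp
        rw [htarget, pvAdj_append u hu0 mid (F2 ++ [hi]), hLform]
        simp

theorem crack_seed_spec : Claim_equal_crack_seed := by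
  intro cov _ hpre
  unfold Spec_crack_seed
  obtain ⟨c, rest, rfl⟩ := List.exists_cons_of_ne_nil hpre
  -- A's seed_block, closed form
  have hA := pvA_loop (c :: rest) [] (c :: rest) [] 0 c rfl
  simp only [List.length_nil, Nat.cast_zero] at hA
  have hbnds0 : pvBnds 0 c (c :: rest) = pvBnds 1 c rest := by simp [pvBnds]
  rw [hbnds0] at hA
  -- B's seed_block, closed form
  have hn : (0 : Int) < ((c :: rest).length : Int) := by simp
  have hB := pvGo_eq (c :: rest) (((c :: rest).length : Int)).toNat 0 ((c :: rest).length : Int)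
    (by omega) hn
  have hf := pvB_filter rest [] (c :: rest) c rfl
  simp only [List.length_nil, Nat.cast_zero, zero_add] at hf hB
  rw [hf] at hB
  simp only [crack_seed, crack_seed_alt, PySem.List.pyGet?_zero_cons]
  have hlam : (fun (st : List (List Int) × Int × Int) i =>
      if PySem.List.pyGetD (c :: rest) i 0 ≠ st.2.2 then
        (st.1 ++ [[st.2.1, i]], i, PySem.List.pyGetD (c :: rest) i 0)
      else st) = pvBody (c :: rest) := rfl
  rw [hlam, hA]
  simp only [hn, if_pos, hB]
  rw [PySem.List.foldl_append_singleton_eq_self]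
  simp

@[simp] theorem crack_seed_raises : Claim_raises_crack_seed := by
  unfold Claim_raises_crack_seed
  exact ⟨fun c _ hr hp => hp hr, by decide⟩
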